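-- pv_equiv track=rewrite | github.com/AvielBitton/linktree | scripts/sync-gcal.py | apply_strength_map
-- ===== SOURCE A (Python) =====
-- STRENGTH_MAP = {
--     1: "Lower",    # Sat  Apr 18
--     2: "Pull",     # Mon  Apr 21
--     3: "Push",     # Tue  Apr 22
--     4: "Upper",    # Wed  Apr 23
--     5: "Lower",    # Fri  Apr 25
--     6: "Push",     # Mon  Apr 28
--     7: "Upper",    # Tue  Apr 29
--     8: "Pull",     # Wed  Apr 30
--     9: "Lower",    # Fri  May 2
-- }
--
-- def apply_strength_map(workouts, today):
--     """Replace Runna's generic strength titles and descriptions with actual gym info."""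
--     future_strength = [
--         w for w in workouts
--         if (w.get("WorkoutType") or "").lower() == "strength"
--         and (w.get("WorkoutDay") or "")[:10] >= today
--     ]
--     future_strength.sort(key=lambda w: (w.get("WorkoutDay") or "")[:10])
--
--     for i, w in enumerate(future_strength):
--         ordinal = i + 1
--         name = STRENGTH_MAP.get(ordinal)
--         if name:
--             w["Title"] = name
--             w["WorkoutDescription"] = ""
--             w["PlannedDuration"] = "1.5"
--
--     return workouts
-- ===== SOURCE B (Python) =====
-- # Bounded-selection relabeler: one pass keeps only the 9 earliest future strength
-- # workouts in a small sorted buffer (no full sort); mutates the shared workout dicts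
-- # in place, like the original.
--
-- STRENGTH_LABELS = ["Lower", "Pull", "Push", "Upper", "Lower",
--                    "Push", "Upper", "Pull", "Lower"]
--
-- def apply_strength_map(workouts, today):
--     """Replace Runna's generic strength titles and descriptions with actual gym info."""
--     limit = len(STRENGTH_LABELS)
--     best = []  # up to `limit` entries (day, seq, workout), kept sorted by (day, seq)
--     seq = 0
--     for w in workouts:
--         if (w.get("WorkoutType") or "").lower() != "strength":
--             continue
--         day = (w.get("WorkoutDay") or "")[:10]
--         if day < today:
--             continue
--         pos = 0
--         while pos < len(best) and (best[pos][0], best[pos][1]) < (day, seq):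
--             pos += 1
--         best.insert(pos, (day, seq, w))
--         del best[limit:]
--         seq += 1
--     for i, (_, _, w) in enumerate(best):
--         w["Title"] = STRENGTH_LABELS[i]
--         w["WorkoutDescription"] = ""
--         w["PlannedDuration"] = "1.5"
--     return workouts
-- ===== Notes on version B (the rewrite author's own statement) =====
-- stated objective: alternative
-- what changed: Replaces A's build-a-list-then-stable-sort of all future strength workouts by a single bounded-selection pass that keeps only the 9 earliest (date, sequence) entries in a small sorted buffer, since ordinals beyond the 9 labels never cause any relabeling.
import Mathlib
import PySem

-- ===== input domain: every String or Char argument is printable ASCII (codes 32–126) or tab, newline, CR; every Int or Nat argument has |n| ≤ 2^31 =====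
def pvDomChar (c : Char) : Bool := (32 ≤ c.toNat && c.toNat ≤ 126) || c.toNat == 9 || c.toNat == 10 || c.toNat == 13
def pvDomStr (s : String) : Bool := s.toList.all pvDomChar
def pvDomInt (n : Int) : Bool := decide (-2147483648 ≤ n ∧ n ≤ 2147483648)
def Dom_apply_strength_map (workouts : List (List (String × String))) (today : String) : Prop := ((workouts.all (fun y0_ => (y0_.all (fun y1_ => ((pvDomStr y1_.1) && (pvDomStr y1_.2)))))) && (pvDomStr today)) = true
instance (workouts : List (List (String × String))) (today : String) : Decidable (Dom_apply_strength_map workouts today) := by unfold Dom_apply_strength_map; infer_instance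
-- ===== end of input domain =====

-- B replaces A's filter-then-sort with one bounded-selection pass that keeps only the
-- 9 earliest future strength workouts in a small sorted buffer (objective: alternative).
-- Both A and B mutate the workout dicts in place; the equivalence proved is about the
-- returned list, whose entries are exactly those (identically) mutated dicts.

-- ===== PORT A =====
-- shared helpers (same subexpressions occur verbatim in both Pythons)
def pvDay (w : List (String × String)) : String :=
  PySem.Str.slice ((PySem.Dict.mk w).getD "WorkoutDay" "") none (some 10)

def pvIsFutureStrength (today : String) (w : List (String × String)) : Bool :=
  (PySem.Str.lower ((PySem.Dict.mk w).getD "WorkoutType" "") == "strength")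
    && decide (today ≤ pvDay w)

-- w["Title"] = name; w["WorkoutDescription"] = ""; w["PlannedDuration"] = "1.5"
def pvRelabel (name : String) (w : List (String × String)) : List (String × String) :=
  ((((PySem.Dict.mk w).insert "Title" name).insert "WorkoutDescription" "").insert
      "PlannedDuration" "1.5").items

def pvSMAP : PySem.Dict Int String :=
  PySem.Dict.ofList [(1, "Lower"), (2, "Pull"), (3, "Push"), (4, "Upper"), (5, "Lower"),
    (6, "Push"), (7, "Upper"), (8, "Pull"), (9, "Lower")]

-- Python mutates shared dicts; we model identity by the workout's index in `workouts`:
-- collect the relabelled dicts keyed by index, then rebuild the returned list.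
def apply_strength_map (workouts : List (List (String × String))) (today : String) :
    List (List (String × String)) :=
  let future_strength :=
    (PySem.List.enumerate workouts).filter (fun p => pvIsFutureStrength today p.2)
  let sortedF := PySem.List.sorted future_strength (fun p => pvDay p.2)
  let upd : PySem.Dict Int (List (String × String)) :=
    (PySem.List.enumerate sortedF).foldl (fun acc q =>
      match pvSMAP.get? (q.1 + 1) with          -- name = STRENGTH_MAP.get(ordinal)
      | some name =>                            -- if name:
          if name == "" then acc else acc.insert q.2.1 (pvRelabel name q.2.2)
      | none => acc) (PySem.Dict.mk [])
  (PySem.List.enumerate workouts).map (fun p => (upd.get? p.1).getD p.2)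

-- ===== PORT B =====
def pvLabels : List String :=
  ["Lower", "Pull", "Push", "Upper", "Lower", "Push", "Upper", "Pull", "Lower"]

-- the `pos` scan + best.insert(pos, …): keep entries whose (day, seq) key is
-- lexicographically smaller, insert in front of the first that is not
def pvBInsert (key : String × Int) (x : Int × List (String × String))
    (best : List ((String × Int) × Int × List (String × String))) :
    List ((String × Int) × Int × List (String × String)) :=
  match best with
  | [] => [(key, x)]
  | e :: t =>
      if e.1.1 < key.1 ∨ (e.1.1 = key.1 ∧ e.1.2 < key.2) then e :: pvBInsert key x t
      else (key, x) :: e :: t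

def apply_strength_map_alt (workouts : List (List (String × String))) (today : String) :
    List (List (String × String)) :=
  let limit := pvLabels.length
  -- one pass: (seq, best); best holds ≤ limit entries sorted by (day, seq)
  let st := (PySem.List.enumerate workouts).foldl
    (fun (st : Int × List ((String × Int) × Int × List (String × String))) p =>
      if pvIsFutureStrength today p.2 then
        (st.1 + 1, (pvBInsert (pvDay p.2, st.1) p st.2).take limit)
      else st) ((0 : Int), [])
  let upd : PySem.Dict Int (List (String × String)) :=
    (PySem.List.enumerate st.2).foldl (fun acc q =>
      acc.insert q.2.2.1 (pvRelabel (PySem.List.pyGetD pvLabels q.1 "") q.2.2.2))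
      (PySem.Dict.mk [])
  (PySem.List.enumerate workouts).map (fun p => (upd.get? p.1).getD p.2)

-- ===== PRECONDITION & SPEC =====
def Spec_apply_strength_map (workouts : List (List (String × String))) (today : String) (out : List (List (String × String))) : Prop := out = apply_strength_map_alt workouts today
instance (workouts : List (List (String × String))) (today : String) (out : List (List (String × String))) : Decidable (Spec_apply_strength_map workouts today out) := by unfold Spec_apply_strength_map; infer_instance

-- ===== CLAIM (what is proved, stated in full; the proofs are below) =====
def Claim_equal_apply_strength_map : Prop := ∀ (workouts : List (List (String × String))) (today : String), Dom_apply_strength_map workouts today → Spec_apply_strength_map workouts today (apply_strength_map workouts today)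

-- ===== LEMMAS AND PROOFS =====

-- membership in pvBInsert
theorem pvBInsert_mem {key x e} {b : List ((String × Int) × Int × List (String × String))}
    (h : e ∈ pvBInsert key x b) : e = (key, x) ∨ e ∈ b := by
  induction b with
  | nil => simp [pvBInsert] at h; simp [h]
  | cons hd t ih =>
      simp only [pvBInsert] at h
      split at h
      · rcases List.mem_cons.mp h with h' | h'
        · exact Or.inr (List.mem_cons.mpr (Or.inl h'))
        · rcases ih h' with h'' | h''
          · exact Or.inl h''
          · exact Or.inr (List.mem_cons.mpr (Or.inr h''))
      · rcases List.mem_cons.mp h with h' | h'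
        · exact Or.inl h'
        · exact Or.inr h'

-- pvBInsert agrees with the stable insertBy used by sorted, once decorations are dropped
theorem pvBInsert_map_snd (x : Int × List (String × String)) (s : Int)
    (b : List ((String × Int) × Int × List (String × String)))
    (hb : ∀ e ∈ b, e.1.1 = pvDay e.2.2 ∧ e.1.2 < s) :
    (pvBInsert (pvDay x.2, s) x b).map (·.2)
      = PySem.List.insertBy (fun a b => decide (pvDay a.2 < pvDay b.2)) x (b.map (·.2)) := by
  induction b with
  | nil => simp [pvBInsert, PySem.List.insertBy]
  | cons e t ih =>
      obtain ⟨hk, hs⟩ := hb e (List.mem_cons_self ..)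
      have ht : ∀ e' ∈ t, e'.1.1 = pvDay e'.2.2 ∧ e'.1.2 < s :=
        fun e' he' => hb e' (List.mem_cons_of_mem _ he')
      simp only [List.map_cons, pvBInsert, PySem.List.insertBy]
      by_cases hlt : pvDay x.2 < pvDay e.2.2
      · have hcond : ¬ (e.1.1 < pvDay x.2 ∨ (e.1.1 = pvDay x.2 ∧ e.1.2 < s)) := by
          rw [hk]
          rintro (h | ⟨h, -⟩)
          · exact absurd hlt (lt_asymm h)
          · exact absurd h (ne_of_gt hlt)
        rw [if_neg hcond, if_pos (decide_eq_true hlt)]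
        simp
      · have hcond : e.1.1 < pvDay x.2 ∨ (e.1.1 = pvDay x.2 ∧ e.1.2 < s) := by
          rw [hk]
          rcases lt_trichotomy (pvDay e.2.2) (pvDay x.2) with h | h | h
          · exact Or.inl h
          · exact Or.inr ⟨h, hs⟩
          · exact absurd h hlt
        rw [if_pos hcond, if_neg (by simpa using hlt)]
        simp [ih ht]

-- truncation commutes with front-scan insertion
theorem take_insertBy {α : Type} (before : α → α → Bool) (x : α) :
    ∀ (l : List α) (n : Nat),
      (PySem.List.insertBy before x (l.take n)).take n
        = (PySem.List.insertBy before x l).take n := by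
  intro l
  induction l with
  | nil => intro n; simp
  | cons e t ih =>
      intro n
      cases n with
      | zero => rfl
      | succ m =>
          simp only [List.take_succ_cons, PySem.List.insertBy]
          split
          · cases m with
            | zero => rfl
            | succ m' => simp [List.take_succ_cons, List.take_take]
          · simp only [List.take_succ_cons, ih m]

-- the one-pass bounded buffer equals take 9 of the stable insertion fold
theorem fold_rel :
    ∀ (l : List (Int × List (String × String))) (s : Int)
      (b : List ((String × Int) × Int × List (String × String)))
      (c : List (Int × List (String × String))),
      (∀ e ∈ b, e.1.1 = pvDay e.2.2 ∧ e.1.2 < s) →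
      b.map (·.2) = c.take 9 →
      ((l.foldl (fun st p => (st.1 + 1, (pvBInsert (pvDay p.2, st.1) p st.2).take 9)) (s, b)).2).map (·.2)
        = (l.foldl (fun acc x =>
            PySem.List.insertBy (fun a b => decide (pvDay a.2 < pvDay b.2)) x acc) c).take 9 := by
  intro l
  induction l with
  | nil => intro s b c h1 h2; simpa using h2
  | cons p rest ih =>
      intro s b c h1 h2
      simp only [List.foldl_cons]
      apply ih
      · intro e he
        rcases pvBInsert_mem (List.mem_of_mem_take he) with rfl | he'
        · refine ⟨rfl, ?_⟩
          show s < s + 1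
          omega
        · obtain ⟨hk, hs⟩ := h1 e he'
          exact ⟨hk, by omega⟩
      · rw [List.map_take, pvBInsert_map_snd p s b h1, h2, take_insertBy]

-- STRENGTH_MAP.get(k+1) for 0 ≤ k < 9 is the k-th label
theorem smap_get_lt (k : Int) (h0 : 0 ≤ k) (h9 : k < 9) :
    pvSMAP.get? (k + 1) = some (PySem.List.pyGetD pvLabels k "") := by
  interval_cases k <;> decide

-- STRENGTH_MAP.get(k+1) for k ≥ 9 misses
theorem smap_get_ge (k : Int) (h : 9 ≤ k) : pvSMAP.get? (k + 1) = none := by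
  show (PySem.Dict.mk [((1:Int), "Lower"), (2, "Pull"), (3, "Push"), (4, "Upper"), (5, "Lower"),
    (6, "Push"), (7, "Upper"), (8, "Pull"), (9, "Lower")]).get? (k + 1) = none
  simp only [PySem.Dict.get?_mk_cons, beq_iff_eq]
  rw [if_neg (by omega), if_neg (by omega), if_neg (by omega), if_neg (by omega),
    if_neg (by omega), if_neg (by omega), if_neg (by omega), if_neg (by omega),
    if_neg (by omega)]
  rfl

-- A's update loop ignores every entry with index ≥ 9
theorem foldA_ge (l : List (Int × List (String × String))) :
    ∀ (s : Int) (acc : PySem.Dict Int (List (String × String))), 9 ≤ s →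
      (PySem.List.enumerate l s).foldl (fun acc q =>
        match pvSMAP.get? (q.1 + 1) with
        | some name =>
            if name == "" then acc else acc.insert q.2.1 (pvRelabel name q.2.2)
        | none => acc) acc = acc := by
  induction l with
  | nil => intro s acc _; rfl
  | cons p rest ih =>
      intro s acc hs
      rw [PySem.List.enumerate_cons, List.foldl_cons]
      have : pvSMAP.get? (s + 1) = none := smap_get_ge s hs
      simp only [this]
      exact ih (s + 1) acc (by omega)

-- dropping the (day, seq) decoration from B's update loop
theorem foldB_strip (l : List ((String × Int) × Int × List (String × String))) :
    ∀ (s : Int) (acc : PySem.Dict Int (List (String × String))),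
      (PySem.List.enumerate l s).foldl (fun acc q =>
        acc.insert q.2.2.1 (pvRelabel (PySem.List.pyGetD pvLabels q.1 "") q.2.2.2)) acc
      = (PySem.List.enumerate (l.map (·.2)) s).foldl (fun acc q =>
        acc.insert q.2.1 (pvRelabel (PySem.List.pyGetD pvLabels q.1 "") q.2.2)) acc := by
  induction l with
  | nil => intro s acc; rfl
  | cons e t ih =>
      intro s acc
      rw [List.map_cons, PySem.List.enumerate_cons, PySem.List.enumerate_cons,
        List.foldl_cons, List.foldl_cons, ih]

-- the k-th label is never empty
theorem label_ne_empty (k : Int) (h0 : 0 ≤ k) (h9 : k < 9) :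
    (PySem.List.pyGetD pvLabels k "" == "") = false := by
  interval_cases k <;> decide

-- A's loop body, for an ordinal index 0 ≤ k < 9, is exactly B's relabel-by-label step
theorem fA_body_eq (acc : PySem.Dict Int (List (String × String)))
    (q : Int × Int × List (String × String)) (h0 : 0 ≤ q.1) (h9 : q.1 < 9) :
    (match pvSMAP.get? (q.1 + 1) with
      | some name =>
          if name == "" then acc else acc.insert q.2.1 (pvRelabel name q.2.2)
      | none => acc)
    = acc.insert q.2.1 (pvRelabel (PySem.List.pyGetD pvLabels q.1 "") q.2.2) := by
  rw [smap_get_lt _ h0 h9]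
  dsimp only
  rw [label_ne_empty _ h0 h9]
  simp

-- the two update dictionaries coincide
theorem upd_eq (sortedF : List (Int × List (String × String))) :
    (PySem.List.enumerate sortedF).foldl (fun acc q =>
      match pvSMAP.get? (q.1 + 1) with
      | some name =>
          if name == "" then acc else acc.insert q.2.1 (pvRelabel name q.2.2)
      | none => acc) (PySem.Dict.mk [])
    = (PySem.List.enumerate (sortedF.take 9)).foldl (fun acc q =>
      acc.insert q.2.1 (pvRelabel (PySem.List.pyGetD pvLabels q.1 "") q.2.2))
      (PySem.Dict.mk []) := by
  conv_lhs => rw [← List.take_append_drop 9 sortedF]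
  rw [PySem.List.enumerate_append, List.foldl_append]
  have hlen : ((sortedF.take 9).length : Int) = min 9 sortedF.length := by
    simp [List.length_take]
  by_cases hle : sortedF.length ≤ 9
  · rw [List.drop_eq_nil_of_le hle, PySem.List.enumerate_nil, List.foldl_nil]
    apply PySem.List.foldl_congr_mem
    intro acc q hq
    obtain ⟨k, hk, rfl⟩ := (PySem.List.mem_enumerate_iff _ _ _).mp hq
    have hk9 : k < 9 := by
      have := List.length_take_le 9 sortedF
      omega
    exact fA_body_eq acc _ (show (0:Int) ≤ 0 + (k:Int) by omega)
      (show (0:Int) + (k:Int) < 9 by omega)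
  · rw [foldA_ge _ _ _ (by omega)]
    apply PySem.List.foldl_congr_mem
    intro acc q hq
    obtain ⟨k, hk, rfl⟩ := (PySem.List.mem_enumerate_iff _ _ _).mp hq
    have hk9 : k < 9 := by
      have := List.length_take_le 9 sortedF
      omega
    exact fA_body_eq acc _ (show (0:Int) ≤ 0 + (k:Int) by omega)
      (show (0:Int) + (k:Int) < 9 by omega)

-- ===== VERDICT (by name: the statement is the Claim_ definition above) =====
theorem apply_strength_map_spec : Claim_equal_apply_strength_map := by
  intro workouts today _
  show apply_strength_map workouts today = apply_strength_map_alt workouts today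
  unfold apply_strength_map apply_strength_map_alt
  simp only [PySem.List.foldl_if_eq_foldl_filter
    (fun p => pvIsFutureStrength today p.2)
    (fun st p => (st.1 + 1, (pvBInsert (pvDay p.2, st.1) p st.2).take pvLabels.length))]
  rw [foldB_strip]
  have hrel := fold_rel
    ((PySem.List.enumerate workouts).filter (fun p => pvIsFutureStrength today p.2))
    0 [] [] (by simp) (by simp)
  rw [show pvLabels.length = 9 from rfl, hrel, ← PySem.List.sorted_eq_foldl_insertBy,
    ← upd_eq]
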